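-- pv_equiv track=rewrite | github.com/viktorexe/uncomment | backend/core/go_processor.py | _handle_raw_strings
-- ===== SOURCE A (Python) =====
-- def _handle_raw_strings(code: str) -> str:
--     """Handle Go raw string literals (backticks)"""
--     result = []
--     i = 0
--
--     while i < len(code):
--         if code[i] == '`':
--             # Start of raw string
--             raw_start = i
--             i += 1
--
--             while i < len(code) and code[i] != '`':
--                 i += 1
--
--             if i < len(code):
--                 result.append(code[raw_start:i+1])
--                 i += 1
--         else:
--             result.append(code[i])
--             i += 1
--
--     return ''.join(result)
-- ===== SOURCE B (Python) =====
-- def _handle_raw_strings(code: str) -> str: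
--     # Backticks pair up sequentially; only a final unmatched backtick drops its tail.
--     if code.count('`') % 2 == 0:
--         return code
--     return code[:code.rfind('`')]
-- ===== Notes on version B (the rewrite author's own statement) =====
-- stated objective: simpler
-- what changed: Replaces the index-driven character-copying scan with a closed form: if the backtick count is even return the string unchanged, otherwise slice off everything from the last (unmatched) backtick via count/rfind.
import Mathlib
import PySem

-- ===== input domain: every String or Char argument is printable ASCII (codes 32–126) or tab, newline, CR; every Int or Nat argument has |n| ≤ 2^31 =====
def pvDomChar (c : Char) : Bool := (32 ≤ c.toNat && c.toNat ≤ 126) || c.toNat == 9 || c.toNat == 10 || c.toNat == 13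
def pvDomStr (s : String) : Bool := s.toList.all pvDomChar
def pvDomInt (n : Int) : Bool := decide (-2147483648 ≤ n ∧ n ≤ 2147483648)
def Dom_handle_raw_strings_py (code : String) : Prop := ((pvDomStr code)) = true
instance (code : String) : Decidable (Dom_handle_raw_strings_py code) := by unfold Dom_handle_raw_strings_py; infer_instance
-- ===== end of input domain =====

-- B replaces A's index-driven copying scan with a closed form (even backtick count: unchanged;
-- odd: slice off everything from the last backtick) — objective: simpler.


-- ===== PORT A =====
-- A's inner `while i < len(code) and code[i] != '`'` loop, as structural recursion over the
-- remaining characters: returns (characters scanned before the closing backtick, rest after it)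
-- when a closing backtick exists, none when the scan runs off the end of the string.
def pvFindClose : List Char → Option (List Char × List Char)
  | [] => none
  | c :: rest =>
    if c = '`' then some ([], rest)
    else
      match pvFindClose rest with
      | none => none
      | some (pre, post) => some (c :: pre, post)

-- cited by pvScanA's decreasing_by
theorem pvFindClose_length : ∀ (l pre post : List Char), pvFindClose l = some (pre, post) → post.length < l.length := by
  intro l
  induction l with
  | nil => intro pre post h; simp [pvFindClose] at h
  | cons c rest ih =>
    intro pre post h
    by_cases hc : c = '`'
    · simp [pvFindClose, hc] at h
      simp [← h.2]
    · cases hfc : pvFindClose rest with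
      | none => simp [pvFindClose, hc, hfc] at h
      | some pr =>
        simp [pvFindClose, hc, hfc] at h
        obtain ⟨h1, h2⟩ := h
        have := ih pr.1 pr.2 (by rw [hfc])
        simp only [List.length_cons, ← h2]
        omega

-- A's outer `while i < len(code)` loop: on a backtick, consume through the closing backtick and
-- append the whole raw string (dropping the tail when unterminated — nothing more is appended and
-- i has reached len); otherwise copy the character.
def pvScanA : List Char → List Char
  | [] => []
  | c :: rest =>
    if c = '`' then
      match h : pvFindClose rest with
      | some (pre, post) => '`' :: (pre ++ '`' :: pvScanA post)
      | none => []
    else c :: pvScanA rest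
termination_by l => l.length
decreasing_by
  · exact Nat.lt_succ_of_lt (pvFindClose_length _ _ _ h)
  · simp

def handle_raw_strings_py (code : String) : String :=
  String.ofList (pvScanA code.toList)

-- ===== PORT B =====
def handle_raw_strings_py_alt (code : String) : String :=
  if PySem.Str.count code "`" % 2 == 0 then code
  else PySem.Str.slice code none (some (PySem.Str.rfind code "`"))

-- ===== PRECONDITION & SPEC =====
def Spec_handle_raw_strings_py (code : String) (out : String) : Prop := out = handle_raw_strings_py_alt code
instance (code : String) (out : String) : Decidable (Spec_handle_raw_strings_py code out) := by unfold Spec_handle_raw_strings_py; infer_instance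

-- ===== CLAIM (what is proved, stated in full; the proofs are below) =====
def Claim_equal_handle_raw_strings_py : Prop := ∀ (code : String), Dom_handle_raw_strings_py code → Spec_handle_raw_strings_py code (handle_raw_strings_py code)

-- ===== LEMMAS AND PROOFS =====

-- unfolding lemmas for pvScanA
theorem pvScanA_cons_ne (c : Char) (rest : List Char) (hc : ¬ c = '`') :
    pvScanA (c :: rest) = c :: pvScanA rest := by
  rw [pvScanA, if_neg hc]

theorem pvScanA_tick_none (rest : List Char) (hfc : pvFindClose rest = none) :
    pvScanA ('`' :: rest) = [] := by
  rw [pvScanA, if_pos rfl]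
  split
  · rename_i pre1 post1 h1
    rw [hfc] at h1; simp at h1
  · rfl

theorem pvScanA_tick_some (rest pre post : List Char) (hfc : pvFindClose rest = some (pre, post)) :
    pvScanA ('`' :: rest) = '`' :: (pre ++ '`' :: pvScanA post) := by
  rw [pvScanA, if_pos rfl]
  split
  · rename_i pre1 post1 h1
    rw [hfc] at h1; simp at h1
    rw [h1.1, h1.2]
  · rename_i h1
    rw [hfc] at h1; simp at h1

-- everything strictly before the LAST backtick of l (empty if none)
def pvBeforeLast (l : List Char) : List Char :=
  (((l.reverse).dropWhile (fun c => c != '`')).drop 1).reverse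

theorem pvBeforeLast_append (xs zs : List Char) (h : '`' ∈ zs) :
    pvBeforeLast (xs ++ zs) = xs ++ pvBeforeLast zs := by
  unfold pvBeforeLast
  have hne : (zs.reverse.dropWhile (fun c => c != '`')).isEmpty = false := by
    rw [List.isEmpty_eq_false_iff, Ne, List.dropWhile_eq_nil_iff]
    intro hall
    have hb := hall '`' (by simpa using h)
    simp at hb
  rw [List.reverse_append, List.dropWhile_append, hne]
  simp only [Bool.false_eq_true, if_false]
  rw [List.drop_append_of_le_length (by
    cases hd : zs.reverse.dropWhile (fun c => c != '`') with
    | nil => exact absurd hd (List.isEmpty_eq_false_iff.mp hne)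
    | cons a t => simp)]
  simp

theorem pvBeforeLast_open (ys : List Char) (h : '`' ∉ ys) :
    pvBeforeLast ('`' :: ys) = [] := by
  unfold pvBeforeLast
  have hall : ys.reverse.dropWhile (fun c => c != '`') = [] := by
    rw [List.dropWhile_eq_nil_iff]
    intro x hx
    simp only [bne_iff_ne, ne_eq]
    intro hxe
    exact h (by simpa [hxe] using (List.mem_reverse.mp hx))
  have hrev : ('`' :: ys).reverse = ys.reverse ++ ['`'] := by simp
  rw [hrev, List.dropWhile_append, hall]
  simp [List.dropWhile]

theorem pvBeforeLast_split (xs ys : List Char) (h : '`' ∉ ys) :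
    pvBeforeLast (xs ++ '`' :: ys) = xs := by
  rw [pvBeforeLast_append xs ('`' :: ys) (by simp), pvBeforeLast_open ys h]
  simp

theorem pvFindClose_none (l : List Char) : pvFindClose l = none → '`' ∉ l := by
  induction l with
  | nil => simp
  | cons c rest ih =>
    intro h
    by_cases hc : c = '`'
    · simp [pvFindClose, hc] at h
    · cases hfc : pvFindClose rest with
      | none =>
        simp only [List.mem_cons, not_or]
        exact ⟨fun he => hc he.symm, ih hfc⟩
      | some pr => simp [pvFindClose, hc, hfc] at h

theorem pvFindClose_some : ∀ (l pre post : List Char), pvFindClose l = some (pre, post) →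
    l = pre ++ '`' :: post ∧ '`' ∉ pre := by
  intro l
  induction l with
  | nil => intro pre post h; simp [pvFindClose] at h
  | cons c rest ih =>
    intro pre post h
    by_cases hc : c = '`'
    · simp [pvFindClose, hc] at h
      obtain ⟨h1, h2⟩ := h
      subst h1; subst h2
      simp [hc]
    · cases hfc : pvFindClose rest with
      | none => simp [pvFindClose, hc, hfc] at h
      | some pr =>
        simp [pvFindClose, hc, hfc] at h
        obtain ⟨ha, hb⟩ := h
        obtain ⟨hrest, hpre⟩ := ih pr.1 pr.2 (by rw [hfc])
        constructor
        · rw [← ha, ← hb, hrest]; simp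
        · rw [← ha]
          simp only [List.mem_cons, not_or]
          exact ⟨fun he => hc he.symm, hpre⟩

-- A's scan, characterised: identity for an even backtick count, else cut at the last backtick.
theorem pvScanA_eq (l : List Char) :
    pvScanA l = if l.count '`' % 2 = 0 then l else pvBeforeLast l := by
  induction hn : l.length using Nat.strong_induction_on generalizing l with
  | _ n ih =>
  cases l with
  | nil => simp [pvScanA]
  | cons c rest =>
    by_cases hc : c = '`'
    · subst hc
      cases hfc : pvFindClose rest with
      | none =>
        have hmem : '`' ∉ rest := pvFindClose_none rest hfc
        have hcnt : rest.count '`' = 0 := List.count_eq_zero.mpr hmem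
        rw [pvScanA_tick_none rest hfc]
        have hone : ('`' :: rest).count '`' % 2 = 1 := by
          simp [hcnt]
        rw [hone]
        simp [pvBeforeLast_open rest hmem]
      | some pr =>
        obtain ⟨pre, post⟩ := pr
        obtain ⟨hrest, hpre⟩ := pvFindClose_some rest pre post hfc
        have hlt : post.length < n := by
          have := pvFindClose_length rest pre post hfc
          simp at hn; omega
        have ihp := ih post.length hlt post rfl
        have hcnt : ('`' :: rest).count '`' = post.count '`' + 2 := by
          rw [hrest]
          simp [List.count_append, List.count_eq_zero.mpr hpre]
        rw [pvScanA_tick_some rest pre post hfc, ihp]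
        by_cases hpar : post.count '`' % 2 = 0
        · rw [if_pos hpar, if_pos (by omega)]
          rw [hrest]
        · rw [if_neg hpar, if_neg (by omega)]
          have hmem : '`' ∈ post :=
            List.count_pos_iff.mp (by omega : 0 < post.count '`')
          have hsplit : ('`' :: rest) = ('`' :: pre ++ ['`']) ++ post := by
            rw [hrest]; simp
          rw [hsplit, pvBeforeLast_append _ post hmem]
          simp
    · have hcnt : (c :: rest).count '`' = rest.count '`' := by
        simp [List.count_cons]
        exact hc
      have hlt : rest.length < n := by simp at hn; omega
      have ihr := ih rest.length hlt rest rfl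
      rw [pvScanA_cons_ne c rest hc, ihr, hcnt]
      by_cases hpar : rest.count '`' % 2 = 0
      · simp [hpar]
      · rw [if_neg hpar, if_neg hpar]
        have hmem : '`' ∈ rest :=
          List.count_pos_iff.mp (by omega : 0 < rest.count '`')
        exact (pvBeforeLast_append [c] rest hmem).symm

-- PySem's str.count with a single-character needle is List.count.
theorem pv_count_go (l : List Char) : ∀ acc, PySem.Chars.count.go ['`'] l.length l acc = acc + l.count '`' := by
  induction l with
  | nil => intro acc; rw [PySem.Chars.count.go.eq_def]; simp
  | cons c rest ih =>
    intro acc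
    rw [PySem.Chars.count.go.eq_def]
    simp only [List.length_cons]
    by_cases hc : c = '`'
    · subst hc
      have hp : List.isPrefixOf ['`'] ('`' :: rest) = true := by simp [List.isPrefixOf]
      simp only [hp, if_true, List.drop_succ_cons, List.length_nil, List.drop_zero]
      rw [ih]
      simp
      omega
    · have hp : List.isPrefixOf ['`'] (c :: rest) = false := by
        simp [List.isPrefixOf]
        exact fun he => hc he.symm
      simp only [hp, Bool.false_eq_true, if_false]
      rw [ih]
      simp [List.count_cons]
      exact hc

theorem pv_count_char (l : List Char) : PySem.Chars.count l ['`'] = l.count '`' := by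
  have hne : (['`'] : List Char).isEmpty = false := rfl
  unfold PySem.Chars.count
  rw [hne]
  simpa using pv_count_go l 0

-- PySem's str.rfind at the canonical last-occurrence decomposition.
theorem pv_rfind_go (xs ys : List Char) (h : '`' ∉ ys) :
    ∀ d, xs.length + d ≤ (xs ++ '`' :: ys).length →
      PySem.Chars.rfind.go (xs ++ '`' :: ys) ['`'] (xs.length + d) = (xs.length : Int) := by
  intro d
  induction d with
  | zero =>
    intro _
    rw [PySem.Chars.rfind.go.eq_def]
    have hdrop : List.drop xs.length (xs ++ '`' :: ys) = '`' :: ys := List.drop_left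
    cases hx : xs.length with
    | zero =>
      have hxe : (xs ++ '`' :: ys) = '`' :: ys := by
        have : xs = [] := List.length_eq_zero_iff.mp hx
        simp [this]
      simp [hxe, List.isPrefixOf]
    | succ j =>
      simp only
      have hd1 : List.drop (j + 1) (xs ++ '`' :: ys) = '`' :: ys := by rw [← hx]; exact hdrop
      rw [hd1]
      simp [List.isPrefixOf]
  | succ d ihd =>
    intro hle
    rw [PySem.Chars.rfind.go.eq_def]
    have hx : xs.length + (d + 1) = (xs.length + d) + 1 := by omega
    rw [hx]
    simp only
    have hdrop : List.drop (xs.length + d + 1) (xs ++ '`' :: ys) = List.drop d ys := by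
      rw [List.drop_append]
      have h1 : List.drop (xs.length + d + 1) xs = [] := by
        apply List.drop_eq_nil_of_le; omega
      have h2 : xs.length + d + 1 - xs.length = d + 1 := by omega
      rw [h1, h2, List.drop_succ_cons]
      simp
    have hnp : List.isPrefixOf ['`'] (List.drop d ys) = false := by
      cases hdy : List.drop d ys with
      | nil => rfl
      | cons a t =>
        have ha : a ∈ ys := by
          have : a ∈ List.drop d ys := by rw [hdy]; simp
          exact List.mem_of_mem_drop this
        have hne : ¬ ('`' = a) := fun he => h (he ▸ ha)
        simp [List.isPrefixOf, hne]
    rw [hdrop, hnp]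
    simp only [Bool.false_eq_true, if_false]
    exact ihd (by simp at hle ⊢; omega)

theorem pv_rfind_char (xs ys : List Char) (h : '`' ∉ ys) :
    PySem.Chars.rfind (xs ++ '`' :: ys) ['`'] = (xs.length : Int) := by
  unfold PySem.Chars.rfind
  have hlen : (xs ++ '`' :: ys).length = xs.length + (ys.length + 1) := by simp
  rw [hlen]
  exact pv_rfind_go xs ys h (ys.length + 1) (by simp)

-- existence of the last-occurrence decomposition
theorem pv_split_last (l : List Char) (h : '`' ∈ l) :
    ∃ xs ys, l = xs ++ '`' :: ys ∧ '`' ∉ ys := by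
  induction l with
  | nil => simp at h
  | cons c rest ih =>
    by_cases hr : '`' ∈ rest
    · obtain ⟨xs, ys, he, hn⟩ := ih hr
      exact ⟨c :: xs, ys, by rw [he]; simp, hn⟩
    · have hc : c = '`' := by
        rcases List.mem_cons.mp h with h' | h'
        · exact h'.symm
        · exact absurd h' hr
      exact ⟨[], rest, by simp [hc], hr⟩

-- ===== VERDICT (by name: the statement is the Claim_ definition above) =====
theorem handle_raw_strings_py_spec : Claim_equal_handle_raw_strings_py := by
  intro code _
  unfold Spec_handle_raw_strings_py handle_raw_strings_py handle_raw_strings_py_alt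
  rw [PySem.Str.count_eq]
  have hback : ("`" : String).toList = ['`'] := by decide
  rw [hback, pv_count_char, pvScanA_eq]
  by_cases hpar : code.toList.count '`' % 2 = 0
  · rw [if_pos hpar, if_pos (by simpa using hpar)]
    exact String.ofList_toList
  · rw [if_neg hpar, if_neg (by simpa using hpar)]
    have hmem : '`' ∈ code.toList :=
      List.count_pos_iff.mp (by omega : 0 < code.toList.count '`')
    obtain ⟨xs, ys, he, hn⟩ := pv_split_last code.toList hmem
    have hr : PySem.Str.rfind code "`" = (xs.length : Int) := by
      rw [PySem.Str.rfind_eq, hback, he, pv_rfind_char xs ys hn]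
    rw [hr, he, pvBeforeLast_split xs ys hn]
    apply String.toList_injective
    rw [String.toList_ofList, PySem.Str.toList_slice, PySem.Chars.slice_eq_listSlice,
      PySem.List.slice_to _ (by positivity), he]
    simp
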